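-- pv_equiv track=rewrite | github.com/dapazjunior/ifpi-ads-algoritmos2020 | Fabio_06/f6_q1_criptografia.py | substituir_consoantes
-- ===== SOURCE A (Python) =====
-- def substituir_consoantes(string):
--     str_nova = ''
--
--     for caractere in string:
--         if eh_consoante(caractere):
--             str_nova += '#'
--         else:
--             str_nova += caractere
--
--     return str_nova
--
-- def eh_consoante(letra):
--     if ord(letra) == 65 or ord(letra) == 69 or ord(letra) == 73 or ord(letra) == 79 \
--         or ord(letra) == 85 or ord(letra) == 97 or ord(letra) == 101 or ord(letra) == 105 \
--         or ord(letra) == 111 or ord(letra) == 117: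
--         return False
--     else:
--         return True
-- ===== SOURCE B (Python) =====
-- def substituir_consoantes(string):
--     vogais = set('aeiouAEIOU')
--     pieces = []
--     i, n = 0, len(string)
--     while i < n:
--         j = i
--         if string[i] in vogais:
--             while j < n and string[j] in vogais:
--                 j += 1
--             pieces.append(string[i:j])
--         else:
--             while j < n and string[j] not in vogais:
--                 j += 1
--             pieces.append('#' * (j - i))
--         i = j
--     return ''.join(pieces)
-- ===== Notes on version B (the rewrite author's own statement) =====
-- stated objective: alternative
-- what changed: Instead of A's per-character loop that classifies each character with an ord-based helper and appends '#' or the character, B scans the string by maximal runs with two index pointers: a vowel run is copied as a whole slice, a non-vowel run is emitted as one '#'*(run length) block, and the run pieces are joined once.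
import Mathlib
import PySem

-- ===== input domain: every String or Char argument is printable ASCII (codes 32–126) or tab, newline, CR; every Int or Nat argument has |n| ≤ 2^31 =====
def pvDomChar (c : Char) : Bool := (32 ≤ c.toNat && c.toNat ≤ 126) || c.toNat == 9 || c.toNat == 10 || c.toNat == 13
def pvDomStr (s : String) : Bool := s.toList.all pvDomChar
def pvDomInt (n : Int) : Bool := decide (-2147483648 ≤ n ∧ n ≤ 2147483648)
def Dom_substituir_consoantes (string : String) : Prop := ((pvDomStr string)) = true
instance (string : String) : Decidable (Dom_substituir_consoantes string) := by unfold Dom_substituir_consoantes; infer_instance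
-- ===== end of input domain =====

-- B replaces A's per-character append loop (ord-based consonant helper) by a two-pointer
-- run scanner: vowel runs are copied whole, non-vowel runs become one '#' block (alternative).

-- ===== PORT A =====
def eh_consoante (letra : Char) : Bool :=
  if letra.toNat == 65 || letra.toNat == 69 || letra.toNat == 73 || letra.toNat == 79
      || letra.toNat == 85 || letra.toNat == 97 || letra.toNat == 101 || letra.toNat == 105
      || letra.toNat == 111 || letra.toNat == 117 then
    false
  else
    true

-- str_nova ('' built with '+=') is carried as a List Char accumulator; String.mk at the end (exact).
def substituir_consoantes (string : String) : String :=
  String.mk (string.toList.foldl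
    (fun str_nova caractere =>
      if eh_consoante caractere then str_nova ++ ['#'] else str_nova ++ [caractere])
    [])

-- ===== PORT B =====
def pvVogais : List Char := "aeiouAEIOU".toList

-- the inner 'while j < n and <pred>(string[j])' scan of Source B, written out as a helper:
-- returns (the scanned run, the rest of the string from j on)
def pvSpan (p : Char → Bool) : List Char → List Char × List Char
  | [] => ([], [])
  | c :: t => if p c then
      let r := pvSpan p t
      (c :: r.1, r.2)
    else ([], c :: t)

theorem pvSpan_eq (p : Char → Bool) (l : List Char) :
    pvSpan p l = (l.takeWhile p, l.dropWhile p) := by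
  induction l with
  | nil => rfl
  | cons c t ih => by_cases h : p c <;> simp [pvSpan, h, ih, List.takeWhile, List.dropWhile]

-- the outer while loop of Source B: at each position take the maximal run of the current class,
-- emit it (the run itself for vowels, '#' * length for non-vowels), continue after the run.
def pvRuns : List Char → List Char
  | [] => []
  | c :: t =>
    if c ∈ pvVogais then
      let r := pvSpan (fun x => x ∈ pvVogais) (c :: t)
      r.1 ++ pvRuns r.2
    else
      let r := pvSpan (fun x => !(x ∈ pvVogais)) (c :: t)
      List.replicate r.1.length '#' ++ pvRuns r.2
  termination_by l => l.length
  decreasing_by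
    · simp only [pvSpan_eq, List.dropWhile]
      simp [*]
      exact List.length_dropWhile_le _ _
    · simp only [pvSpan_eq, List.dropWhile]
      simp [*]
      exact List.length_dropWhile_le _ _

def substituir_consoantes_alt (string : String) : String :=
  String.mk (pvRuns string.toList)

-- ===== PRECONDITION & SPEC =====
def Spec_substituir_consoantes (string : String) (out : String) : Prop := out = substituir_consoantes_alt string
instance (string : String) (out : String) : Decidable (Spec_substituir_consoantes string out) := by unfold Spec_substituir_consoantes; infer_instance

-- ===== CLAIM (what is proved, stated in full; the proofs are below) =====
def Claim_equal_substituir_consoantes : Prop := ∀ (string : String), Dom_substituir_consoantes string → Spec_substituir_consoantes string (substituir_consoantes string)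

-- ===== LEMMAS AND PROOFS =====

def pvG (c : Char) : Char := if c ∈ pvVogais then c else '#'

theorem char_eq_iff_toNat (c d : Char) : c = d ↔ c.toNat = d.toNat := by
  constructor
  · rintro rfl; rfl
  · intro h; exact Char.ext (UInt32.toNat_inj.mp h)

theorem eh_consoante_eq (c : Char) : eh_consoante c = !(c ∈ pvVogais : Bool) := by
  simp [eh_consoante, pvVogais, List.mem_cons, char_eq_iff_toNat]
  ac_rfl

theorem pvA_fold (l : List Char) (acc : List Char) :
    l.foldl (fun s c => if eh_consoante c then s ++ ['#'] else s ++ [c]) acc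
      = acc ++ l.map pvG := by
  induction l generalizing acc with
  | nil => simp
  | cons c t ih =>
      rw [List.foldl_cons, ih]
      have hstep : (if eh_consoante c then acc ++ ['#'] else acc ++ [c]) = acc ++ [pvG c] := by
        by_cases hc : c ∈ pvVogais <;> simp [eh_consoante_eq, hc, pvG]
      rw [hstep]
      simp

theorem map_const_of_all {α β : Type} (f : α → β) (b : β) (l : List α)
    (h : ∀ a ∈ l, f a = b) : l.map f = List.replicate l.length b := by
  induction l with
  | nil => rfl
  | cons c t ih =>
      simp only [List.map_cons, List.length_cons, List.replicate_succ]
      rw [h c (by simp), ih (fun a ha => h a (by simp [ha]))]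

theorem pvRuns_eq (l : List Char) : pvRuns l = l.map pvG := by
  induction l using pvRuns.induct with
  | case1 => rw [pvRuns]; rfl
  | case2 c t hc r ih =>
      rw [pvRuns]
      simp only [hc, if_true]
      rw [pvSpan_eq]
      have h2 : r.2 = List.dropWhile (fun x => decide (x ∈ pvVogais)) (c :: t) :=
        congrArg Prod.snd (pvSpan_eq _ _)
      rw [h2] at ih
      simp only []
      rw [ih]
      have htk : (List.takeWhile (fun x => decide (x ∈ pvVogais)) (c :: t)).map pvG
          = List.takeWhile (fun x => decide (x ∈ pvVogais)) (c :: t) := by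
        rw [List.map_congr_left (g := id) ?_, List.map_id]
        intro a ha
        have := List.mem_takeWhile_imp ha
        simp at this
        simp [pvG, this]
      conv_rhs => rw [← List.takeWhile_append_dropWhile
        (p := fun x => decide (x ∈ pvVogais)) (l := c :: t)]
      rw [List.map_append, htk]
  | case3 c t hc r ih =>
      rw [pvRuns]
      simp only [hc, if_false]
      rw [pvSpan_eq]
      have h2 : r.2 = List.dropWhile (fun x => !decide (x ∈ pvVogais)) (c :: t) :=
        congrArg Prod.snd (pvSpan_eq _ _)
      rw [h2] at ih
      simp only []
      rw [ih]
      have htk : (List.takeWhile (fun x => !decide (x ∈ pvVogais)) (c :: t)).map pvG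
          = List.replicate (List.takeWhile (fun x => !decide (x ∈ pvVogais)) (c :: t)).length '#' := by
        apply map_const_of_all
        intro a ha
        have := List.mem_takeWhile_imp ha
        simp at this
        simp [pvG, this]
      conv_rhs => rw [← List.takeWhile_append_dropWhile
        (p := fun x => !decide (x ∈ pvVogais)) (l := c :: t)]
      rw [List.map_append, htk]

-- ===== VERDICT (by name: the statement is the Claim_ definition above) =====
theorem substituir_consoantes_spec : Claim_equal_substituir_consoantes := by
  intro s _
  show _ = _
  unfold substituir_consoantes substituir_consoantes_alt
  rw [pvA_fold, pvRuns_eq]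
  simp
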